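-- pv_equiv track=rewrite | github.com/Pl0tter/python_examples | Homework014_Polynomial.py | make_polynomial
-- ===== SOURCE A (Python) =====
-- def make_polynomial(ratio_dict: dict):
--     polynomial = ""
--     degree = 0
--     for k in ratio_dict.keys():
--         if k > degree:
--             degree = k
--
--     for m in range(degree, -1, -1):
--         if ratio_dict.get(m, 0) > 0:
--             if m != degree:
--                 polynomial += f" + {ratio_dict[m]}"
--             else:
--                 polynomial += f"{ratio_dict[m]}"
--         elif ratio_dict.get(m, 0) < 0:
--             if m != degree:
--                 polynomial += f" - {abs(ratio_dict[m])}"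
--             else:
--                 polynomial += f"-{abs(ratio_dict[m])}"
--         if m != 1 and m != 0 and ratio_dict.get(m) != None:
--             polynomial += f"*x**{m}"
--         elif m == 1 and ratio_dict.get(m) != None:
--             polynomial += "*x"
--         elif m == 0:
--             polynomial += " = 0"
--     return polynomial
-- ===== SOURCE B (Python) =====
-- def make_polynomial(ratio_dict: dict):
--     # Process only the keys that are actually present (sorted descending),
--     # instead of scanning every exponent from the maximum degree down to 0.
--     terms = sorted({k for k in ratio_dict if k >= 0}, reverse=True)
--     top = terms[0] if terms else 0
--     parts = []
--     for m in terms: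
--         c = ratio_dict[m]
--         if c > 0:
--             sign = str(c) if m == top else f" + {c}"
--         elif c < 0:
--             sign = f"-{-c}" if m == top else f" - {-c}"
--         else:
--             sign = ""
--         power = f"*x**{m}" if m >= 2 else ("*x" if m == 1 else "")
--         parts.append(sign + power)
--     parts.append(" = 0")
--     return "".join(parts)
-- ===== Notes on version B (the rewrite author's own statement) =====
-- stated objective: faster
-- what changed: B sorts the set of present nonnegative keys descending and emits one term per key, instead of A's scan over every exponent from the maximum degree down to 0 with dict lookups at each step.
import Mathlib
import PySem

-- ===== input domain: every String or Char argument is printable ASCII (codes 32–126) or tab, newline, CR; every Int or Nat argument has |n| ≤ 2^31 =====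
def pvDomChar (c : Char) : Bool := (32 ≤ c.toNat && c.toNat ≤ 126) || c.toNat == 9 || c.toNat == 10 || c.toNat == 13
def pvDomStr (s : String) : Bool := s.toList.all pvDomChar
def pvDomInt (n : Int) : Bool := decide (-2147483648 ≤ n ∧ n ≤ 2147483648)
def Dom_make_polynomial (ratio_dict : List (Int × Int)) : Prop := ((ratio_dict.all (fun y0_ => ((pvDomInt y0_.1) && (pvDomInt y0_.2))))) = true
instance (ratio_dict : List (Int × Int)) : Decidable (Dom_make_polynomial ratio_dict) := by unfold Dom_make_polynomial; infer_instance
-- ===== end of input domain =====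

-- B sorts the keys that are actually present and emits only their terms, instead of
-- scanning every exponent from the maximum degree down to 0 as A does (objective: faster).

-- ===== PORT A =====
def make_polynomial (ratio_dict : List (Int × Int)) : String :=
  let d : PySem.Dict Int Int := PySem.Dict.mk ratio_dict
  -- degree = 0; for k in ratio_dict.keys(): if k > degree: degree = k
  let degree : Int := d.keys.foldl (fun degree k => if k > degree then k else degree) 0
  -- for m in range(degree, -1, -1): …
  (PySem.List.pyRange degree (-1) (-1)).foldl (fun polynomial m =>
    let polynomial :=
      if d.getD m 0 > 0 then
        -- ratio_dict[m]: present here (since get(m,0) > 0), so it equals getD m 0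
        (if m ≠ degree then polynomial ++ " + " ++ PySem.Int.toStr (d.getD m 0)
         else polynomial ++ PySem.Int.toStr (d.getD m 0))
      else if d.getD m 0 < 0 then
        (if m ≠ degree then polynomial ++ " - " ++ PySem.Int.toStr |d.getD m 0|
         else polynomial ++ "-" ++ PySem.Int.toStr |d.getD m 0|)
      else polynomial
    if m ≠ 1 ∧ m ≠ 0 ∧ d.get? m ≠ none then polynomial ++ "*x**" ++ PySem.Int.toStr m
    else if m = 1 ∧ d.get? m ≠ none then polynomial ++ "*x"
    else if m = 0 then polynomial ++ " = 0"
    else polynomial) ""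

-- ===== PORT B =====
-- one term of B's loop body: sign part followed by power part (c = ratio_dict[m], present since m is a key)
def pvTermB (d : PySem.Dict Int Int) (top m : Int) : String :=
  let c := d.getD m 0
  let sign :=
    if c > 0 then (if m = top then PySem.Int.toStr c else " + " ++ PySem.Int.toStr c)
    else if c < 0 then (if m = top then "-" ++ PySem.Int.toStr (-c) else " - " ++ PySem.Int.toStr (-c))
    else ""
  let power := if m ≥ 2 then "*x**" ++ PySem.Int.toStr m else if m = 1 then "*x" else ""
  sign ++ power

def make_polynomial_alt (ratio_dict : List (Int × Int)) : String :=
  let d : PySem.Dict Int Int := PySem.Dict.mk ratio_dict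
  -- terms = sorted({k for k in ratio_dict if k >= 0}, reverse=True)
  let terms := PySem.List.sorted (PySem.Set.ofList (d.keys.filter (fun k => decide (0 ≤ k)))) (fun x => x) true
  -- top = terms[0] if terms else 0
  let top := terms.headD 0
  let parts := terms.foldl (fun parts m => parts ++ [pvTermB d top m]) ([] : List String)
  PySem.Str.join "" (parts ++ [" = 0"])

-- ===== PRECONDITION & SPEC =====
def Spec_make_polynomial (ratio_dict : List (Int × Int)) (out : String) : Prop := out = make_polynomial_alt ratio_dict
instance (ratio_dict : List (Int × Int)) (out : String) : Decidable (Spec_make_polynomial ratio_dict out) := by unfold Spec_make_polynomial; infer_instance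

-- ===== CLAIM (what is proved, stated in full; the proofs are below) =====
def Claim_equal_make_polynomial : Prop := ∀ (ratio_dict : List (Int × Int)), Dom_make_polynomial ratio_dict → Spec_make_polynomial ratio_dict (make_polynomial ratio_dict)

-- ===== LEMMAS AND PROOFS =====

-- A's term at exponent m (what A's loop body appends at m)
def pvTA (d : PySem.Dict Int Int) (degree m : Int) : String :=
  (if d.getD m 0 > 0 then
     (if m ≠ degree then " + " ++ PySem.Int.toStr (d.getD m 0) else PySem.Int.toStr (d.getD m 0))
   else if d.getD m 0 < 0 then
     (if m ≠ degree then " - " ++ PySem.Int.toStr |d.getD m 0| else "-" ++ PySem.Int.toStr |d.getD m 0|)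
   else "") ++
  (if m ≠ 1 ∧ m ≠ 0 ∧ d.get? m ≠ none then "*x**" ++ PySem.Int.toStr m
   else if m = 1 ∧ d.get? m ≠ none then "*x"
   else if m = 0 then " = 0"
   else "")

def pvCat (l : List String) : String := l.foldr (· ++ ·) ""

theorem pvCat_append (l1 l2 : List String) : pvCat (l1 ++ l2) = pvCat l1 ++ pvCat l2 := by
  induction l1 with
  | nil => simp [pvCat]
  | cons x r ih => simp [pvCat, String.append_assoc] at ih ⊢; simp [ih, String.append_assoc]

theorem pvCat_single (s : String) : pvCat [s] = s := by simp [pvCat]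

-- folding "append a string per element" is init ++ concatenation of the terms
theorem pv_foldl_emit (T : Int → String) (l : List Int) :
    ∀ s : String, l.foldl (fun s m => s ++ T m) s = s ++ pvCat (l.map T) := by
  induction l with
  | nil => intro s; simp [pvCat]
  | cons x r ih => intro s; simp [pvCat] at ih ⊢; rw [ih, String.append_assoc]

theorem pv_foldl_parts (f : Int → String) (l : List Int) :
    ∀ ps : List String, l.foldl (fun ps m => ps ++ [f m]) ps = ps ++ l.map f := by
  induction l with
  | nil => intro ps; simp
  | cons x r ih => intro ps; simp [ih]

theorem pv_intercalate_nil (xs : List (List Char)) : List.intercalate [] xs = xs.flatten := by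
  induction xs with
  | nil => rfl
  | cons x r ih =>
    cases r with
    | nil => simp [List.intercalate]
    | cons y ys => simp_all [List.intercalate, List.intersperse, List.flatten]

theorem pv_join_empty (l : List String) : PySem.Str.join "" l = pvCat l := by
  induction l with
  | nil => decide
  | cons x xs ih =>
    simp [PySem.Str.join, PySem.Chars.join, pv_intercalate_nil, pvCat] at ih ⊢
    exact ih

-- dropping elements whose term is empty
theorem pvCat_filter (T : Int → String) (p : Int → Bool) (l : List Int)
    (h : ∀ m ∈ l, p m = false → T m = "") :
    pvCat (l.map T) = pvCat ((l.filter p).map T) := by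
  induction l with
  | nil => rfl
  | cons x r ih =>
    have hr := ih (fun m hm => h m (List.mem_cons_of_mem _ hm))
    by_cases hx : p x = true
    · simp [pvCat, List.filter_cons, hx] at hr ⊢; rw [hr]
    · have hx' : p x = false := by simpa using hx
      simp [pvCat, List.filter_cons, hx', h x (List.mem_cons_self) hx'] at hr ⊢; rw [hr]

-- range(degree, -1, -1) = range(degree, 0, -1) ++ [0]
theorem pv_range_split (g : Int) (h : 0 ≤ g) :
    PySem.List.pyRange g (-1) (-1) = PySem.List.pyRange g 0 (-1) ++ [0] := by
  rw [PySem.List.pyRange_neg_one_eq_reverse, PySem.List.pyRange_neg_one_eq_reverse]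
  rw [show (-1 : Int) + 1 = 0 by ring, show (0 : Int) + 1 = 1 by ring]
  rw [PySem.List.pyRange_one_cons (by omega)]
  simp

-- facts about the folded maximum
theorem pv_fm_le_init (l : List Int) : ∀ i : Int, i ≤ l.foldl (fun a k => if k > a then k else a) i := by
  induction l with
  | nil => intro i; simp
  | cons x r ih =>
    intro i
    have := ih (if x > i then x else i)
    simp only [List.foldl_cons]
    split_ifs at this ⊢ <;> omega

theorem pv_fm_mem_le (l : List Int) : ∀ i : Int, ∀ k ∈ l, k ≤ l.foldl (fun a k => if k > a then k else a) i := by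
  induction l with
  | nil => intro i k hk; simp at hk
  | cons x r ih =>
    intro i k hk
    simp only [List.foldl_cons]
    rcases List.mem_cons.mp hk with rfl | hk
    · have := pv_fm_le_init r (if k > i then k else i)
      split_ifs at this ⊢ <;> omega
    · exact ih _ k hk

theorem pv_fm_cases (l : List Int) : ∀ i : Int,
    l.foldl (fun a k => if k > a then k else a) i = i ∨ l.foldl (fun a k => if k > a then k else a) i ∈ l := by
  induction l with
  | nil => intro i; simp
  | cons x r ih =>
    intro i
    simp only [List.foldl_cons]
    rcases ih (if x > i then x else i) with h | h
    · rw [h]; split_ifs at h ⊢ <;> simp_all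
    · right; exact List.mem_cons_of_mem _ h

theorem pv_get_ne_none (d : PySem.Dict Int Int) (m : Int) (hc : d.contains m = true) :
    d.get? m ≠ none := by
  rw [PySem.Dict.contains_eq_isSome_get?] at hc
  exact Option.isSome_iff_ne_none.mp hc

theorem pv_term_pos (d : PySem.Dict Int Int) (g m : Int) (hc : d.contains m = true)
    (hm : 1 ≤ m) : pvTA d g m = pvTermB d g m := by
  have hne := pv_get_ne_none d m hc
  simp only [pvTA, pvTermB]
  rcases lt_trichotomy (d.getD m 0) 0 with h | h | h
  · rw [abs_of_neg h]
    split_ifs <;> simp_all <;> omega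
  · split_ifs <;> simp_all <;> omega
  · split_ifs <;> simp_all <;> omega

theorem pv_term_zero (d : PySem.Dict Int Int) (g : Int) (hc : d.contains 0 = true) :
    pvTA d g 0 = pvTermB d g 0 ++ " = 0" := by
  have hne := pv_get_ne_none d 0 hc
  simp only [pvTA, pvTermB]
  rcases lt_trichotomy (d.getD 0 0) 0 with h | h | h
  · rw [abs_of_neg h]
    split_ifs <;> simp_all [String.append_assoc] <;> omega
  · split_ifs <;> simp_all [String.append_assoc] <;> omega
  · split_ifs <;> simp_all [String.append_assoc] <;> omega

theorem pv_TA_empty (d : PySem.Dict Int Int) (g m : Int) (hc : d.contains m = false)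
    (hm : 1 ≤ m) : pvTA d g m = "" := by
  have h1 : d.getD m 0 = 0 := PySem.Dict.getD_of_not_contains d 0 hc
  have h2 : d.get? m = none := by
    rw [PySem.Dict.contains_eq_isSome_get?] at hc
    simpa using hc
  simp only [pvTA, h1, h2]
  split_ifs <;> simp_all <;> omega

theorem pv_TA_zero_nc (d : PySem.Dict Int Int) (g : Int) (hc : d.contains 0 = false) :
    pvTA d g 0 = " = 0" := by
  have h1 : d.getD 0 0 = 0 := PySem.Dict.getD_of_not_contains d 0 hc
  have h2 : d.get? 0 = none := by
    rw [PySem.Dict.contains_eq_isSome_get?] at hc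
    simpa using hc
  simp [pvTA, h1, h2]

def pvRf (d : PySem.Dict Int Int) (g : Int) : List Int :=
  (PySem.List.pyRange g (-1) (-1)).filter (fun m => d.contains m)

theorem pv_pairwise_Rf (d : PySem.Dict Int Int) (g : Int) :
    (pvRf d g).Pairwise (fun a b => b < a) := by
  apply List.Pairwise.filter
  rw [PySem.List.pyRange_neg_one_eq_reverse]
  rw [List.pairwise_reverse]
  exact PySem.List.pairwise_lt_pyRange_one _ _

theorem pv_mem_Rf (d : PySem.Dict Int Int) (g m : Int) :
    m ∈ pvRf d g ↔ d.contains m = true ∧ -1 < m ∧ m ≤ g := by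
  simp [pvRf, List.mem_filter, PySem.List.mem_pyRange_neg_one, and_comm]

theorem pv_nodup_Rf (d : PySem.Dict Int Int) (g : Int) : (pvRf d g).Nodup := by
  exact (pv_pairwise_Rf d g).imp (fun h => by omega)

theorem pv_terms_eq (d : PySem.Dict Int Int) (g : Int)
    (hub : ∀ k ∈ d.keys, k ≤ g) :
    PySem.List.sorted (PySem.Set.ofList (d.keys.filter (fun k => decide (0 ≤ k)))) (fun x => x) true
      = pvRf d g := by
  apply PySem.List.sorted_rev_eq_of_perm_of_pairwise_gt
  · rw [List.perm_ext_iff_of_nodup (pv_nodup_Rf d g) (PySem.Set.nodup_ofList _)]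
    intro a
    rw [pv_mem_Rf, PySem.Set.mem_ofList, List.mem_filter]
    rw [← PySem.Dict.contains_iff_mem_keys]
    constructor
    · rintro ⟨h1, h2, h3⟩; exact ⟨h1, by simp; omega⟩
    · rintro ⟨h1, h2⟩
      refine ⟨h1, by simp at h2; omega, hub a ((PySem.Dict.contains_iff_mem_keys d a).mp h1)⟩
  · exact pv_pairwise_Rf d g

theorem pv_head_Rf (d : PySem.Dict Int Int) (g : Int) (h0 : 0 ≤ g)
    (hdm : g = 0 ∨ g ∈ d.keys)
    (hne : pvRf d g ≠ []) : (pvRf d g).headD 0 = g := by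
  rcases hh : pvRf d g with _ | ⟨h, t⟩
  · exact absurd hh hne
  have hmem : h ∈ pvRf d g := by rw [hh]; exact List.mem_cons_self
  rw [pv_mem_Rf] at hmem
  obtain ⟨hc, hl, hu⟩ := hmem
  rcases hdm with rfl | hk
  · simp; omega
  · have hgR : g ∈ pvRf d g := by
      rw [pv_mem_Rf]
      exact ⟨(PySem.Dict.contains_iff_mem_keys d g).mpr hk, by omega, le_refl g⟩
    rw [hh] at hgR
    rcases List.mem_cons.mp hgR with rfl | hgt
    · simp
    · have hp := pv_pairwise_Rf d g
      rw [hh] at hp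
      have := (List.pairwise_cons.mp hp).1 g hgt
      simp; omega

-- A's loop body appends exactly pvTA at each step
theorem pv_stepA (d : PySem.Dict Int Int) (degree : Int) :
    (fun (polynomial : String) (m : Int) =>
      let polynomial :=
        if d.getD m 0 > 0 then
          (if m ≠ degree then polynomial ++ " + " ++ PySem.Int.toStr (d.getD m 0)
           else polynomial ++ PySem.Int.toStr (d.getD m 0))
        else if d.getD m 0 < 0 then
          (if m ≠ degree then polynomial ++ " - " ++ PySem.Int.toStr |d.getD m 0|
           else polynomial ++ "-" ++ PySem.Int.toStr |d.getD m 0|)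
        else polynomial
      if m ≠ 1 ∧ m ≠ 0 ∧ d.get? m ≠ none then polynomial ++ "*x**" ++ PySem.Int.toStr m
      else if m = 1 ∧ d.get? m ≠ none then polynomial ++ "*x"
      else if m = 0 then polynomial ++ " = 0"
      else polynomial) = fun s m => s ++ pvTA d degree m := by
  funext s m
  simp only [pvTA]
  split_ifs <;> simp [String.append_assoc]

theorem pv_A_char (rd : List (Int × Int)) :
    make_polynomial rd
      = pvCat ((PySem.List.pyRange ((PySem.Dict.mk rd).keys.foldl (fun a k => if k > a then k else a) 0) (-1) (-1)).map
          (pvTA (PySem.Dict.mk rd) ((PySem.Dict.mk rd).keys.foldl (fun a k => if k > a then k else a) 0))) := by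
  unfold make_polynomial
  dsimp only
  rw [pv_stepA, pv_foldl_emit]
  simp

theorem pv_B_char (rd : List (Int × Int)) :
    make_polynomial_alt rd
      = pvCat ((PySem.List.sorted (PySem.Set.ofList ((PySem.Dict.mk rd).keys.filter (fun k => decide (0 ≤ k)))) (fun x => x) true).map
          (pvTermB (PySem.Dict.mk rd)
            ((PySem.List.sorted (PySem.Set.ofList ((PySem.Dict.mk rd).keys.filter (fun k => decide (0 ≤ k)))) (fun x => x) true).headD 0)))
        ++ " = 0" := by
  unfold make_polynomial_alt
  dsimp only
  rw [pv_foldl_parts, pv_join_empty, pvCat_append, pvCat_single]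
  simp

-- ===== VERDICT (by name: the statement is the Claim_ definition above) =====
theorem make_polynomial_spec : Claim_equal_make_polynomial := by
  intro rd _
  unfold Spec_make_polynomial
  rw [pv_A_char, pv_B_char]
  set d := PySem.Dict.mk rd with hd
  set g : Int := d.keys.foldl (fun a k => if k > a then k else a) 0 with hg
  have h0 : 0 ≤ g := pv_fm_le_init d.keys 0
  have hub : ∀ k ∈ d.keys, k ≤ g := fun k hk => pv_fm_mem_le d.keys 0 k hk
  have hdm : g = 0 ∨ g ∈ d.keys := pv_fm_cases d.keys 0
  rw [pv_terms_eq d g hub]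
  rw [pv_range_split g h0, List.map_append, pvCat_append]
  rw [pvCat_filter (pvTA d g) (fun m => d.contains m) (PySem.List.pyRange g 0 (-1))
    (by
      intro m hm hc
      have : 0 < m := (PySem.List.mem_pyRange_neg_one.mp hm).1
      exact pv_TA_empty d g m hc (by omega))]
  have hRf : pvRf d g
      = (PySem.List.pyRange g 0 (-1)).filter (fun m => d.contains m)
        ++ (if d.contains 0 then [0] else []) := by
    rw [pvRf, pv_range_split g h0, List.filter_append]
    congr 1
    by_cases hc : d.contains 0 = true <;> simp [List.filter, hc] <;> simp_all
  have hmapeq : ((PySem.List.pyRange g 0 (-1)).filter (fun m => d.contains m)).map (pvTA d g)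
      = ((PySem.List.pyRange g 0 (-1)).filter (fun m => d.contains m)).map (pvTermB d ((pvRf d g).headD 0)) := by
    apply List.map_congr_left
    intro m hm
    have hmR : m ∈ pvRf d g := by rw [hRf]; exact List.mem_append_left _ hm
    have hne : pvRf d g ≠ [] := List.ne_nil_of_mem hmR
    rw [pv_head_Rf d g h0 hdm hne]
    obtain ⟨hc, hl, _⟩ := (pv_mem_Rf d g m).mp hmR
    have hm1 : 1 ≤ m := by
      have := List.of_mem_filter hm
      have hmr := (PySem.List.mem_pyRange_neg_one.mp (List.mem_of_mem_filter hm)).1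
      omega
    exact pv_term_pos d g m hc hm1
  rw [hmapeq]
  by_cases hc0 : d.contains 0 = true
  · have hRf' : pvRf d g = (PySem.List.pyRange g 0 (-1)).filter (fun m => d.contains m) ++ [0] := by
      rw [hRf, if_pos hc0]
    have hne : pvRf d g ≠ [] := by rw [hRf']; simp
    rw [pv_head_Rf d g h0 hdm hne]
    rw [hRf', List.map_append, pvCat_append]
    simp only [List.map_cons, List.map_nil, pvCat_single]
    rw [pv_term_zero d g hc0]
    simp [String.append_assoc]
  · have hc0' : d.contains 0 = false := by simpa using hc0
    have hRf' : pvRf d g = (PySem.List.pyRange g 0 (-1)).filter (fun m => d.contains m) := by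
      rw [hRf, if_neg (by simp [hc0'])]; simp
    rw [hRf']
    simp only [List.map_cons, List.map_nil, pvCat_single]
    rw [pv_TA_zero_nc d g hc0']
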